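-- pv_equiv track=rewrite | github.com/jrxperience/AZCS-Inventory | build_sales_match_audit.py | extract_measures
-- ===== SOURCE A (Python) =====
-- from collections import defaultdict
--
-- def extract_measures(normalized_text: str) -> dict[str, set[str]]:
--     measures: dict[str, set[str]] = defaultdict(set)
--     tokens = normalized_text.split()
--     for index, token in enumerate(tokens[:-1]):
--         next_token = tokens[index + 1]
--         if token.isdigit() and next_token in {"GAL", "OZ", "LB", "KIT"}:
--             measures[next_token].add(token)
--     if "HALF" in tokens:
--         measures["SPECIAL"].add("HALF")
--     if "FULL" in tokens:
--         measures["SPECIAL"].add("FULL")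
--     if "KIT" in tokens:
--         measures["SPECIAL"].add("KIT")
--     return dict(measures)
-- ===== SOURCE B (Python) =====
-- def extract_measures(normalized_text: str) -> dict[str, set[str]]:
--     tokens = normalized_text.split()
--     hits = [(nxt, tok) for tok, nxt in zip(tokens, tokens[1:])
--             if tok.isdigit() and nxt in ("GAL", "OZ", "LB", "KIT")]
--     units = []
--     for u, _ in hits:
--         if u not in units:
--             units.append(u)
--     measures = {u: {q for v, q in hits if v == u} for u in units}
--     specials = [m for m in ("HALF", "FULL", "KIT") if m in tokens]
--     if specials:
--         measures["SPECIAL"] = set(specials)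
--     return measures
-- ===== Notes on version B (the rewrite author's own statement) =====
-- stated objective: alternative
-- what changed: B replaces A's incremental dict-mutating pair loop plus three post-loop membership scans by a staged group-by: first extract all (unit, quantity) hit pairs with a zip comprehension, then compute the distinct units in first-occurrence order, build the dict with a per-unit grouping comprehension (one scan of the hits per unit), and attach the SPECIAL set from a single membership comprehension over the three marker words.
import Mathlib
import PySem

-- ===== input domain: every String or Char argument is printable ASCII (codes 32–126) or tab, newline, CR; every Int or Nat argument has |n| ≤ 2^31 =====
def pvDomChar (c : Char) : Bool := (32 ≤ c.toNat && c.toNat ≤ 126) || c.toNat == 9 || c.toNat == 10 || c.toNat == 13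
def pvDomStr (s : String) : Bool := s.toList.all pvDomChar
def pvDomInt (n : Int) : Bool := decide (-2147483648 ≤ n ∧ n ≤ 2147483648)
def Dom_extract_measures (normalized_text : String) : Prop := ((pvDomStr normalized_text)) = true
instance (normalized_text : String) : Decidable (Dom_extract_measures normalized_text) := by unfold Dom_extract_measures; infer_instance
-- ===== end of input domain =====

-- B is a staged group-by (extract hit pairs, then distinct units, then one grouping scan per unit, specials by one membership comprehension) instead of A's incremental dict-mutating pair loop plus three post-loop scans (alternative decomposition, same cost).

-- ===== PORT A =====
-- loop body of A's 'for index, token in enumerate(tokens[:-1])'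
def pvStepA (tokens : List String) (d : PySem.Dict String (PySem.Set String))
    (it : Int × String) : PySem.Dict String (PySem.Set String) :=
  let next_token := PySem.List.pyGetD tokens (it.1 + 1) ""
  if PySem.Str.strIsdigit it.2 &&
      (next_token == "GAL" || next_token == "OZ" || next_token == "LB" || next_token == "KIT") then
    d.insert next_token (PySem.Set.add (d.getD next_token PySem.Set.empty) it.2)
  else d

def extract_measures (normalized_text : String) : List (String × List String) :=
  let tokens := PySem.Str.split₀ normalized_text
  let measures :=
    (PySem.List.enumerate (PySem.List.slice tokens none (some (-1))) 0).foldl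
      (pvStepA tokens) PySem.Dict.empty
  let measures := if tokens.contains "HALF" then
      measures.insert "SPECIAL" (PySem.Set.add (measures.getD "SPECIAL" PySem.Set.empty) "HALF")
    else measures
  let measures := if tokens.contains "FULL" then
      measures.insert "SPECIAL" (PySem.Set.add (measures.getD "SPECIAL" PySem.Set.empty) "FULL")
    else measures
  let measures := if tokens.contains "KIT" then
      measures.insert "SPECIAL" (PySem.Set.add (measures.getD "SPECIAL" PySem.Set.empty) "KIT")
    else measures
  measures.items

-- ===== PORT B =====
-- 'nxt in ("GAL", "OZ", "LB", "KIT")'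
def pvIsUnit (s : String) : Bool := s == "GAL" || s == "OZ" || s == "LB" || s == "KIT"

def extract_measures_alt (normalized_text : String) : List (String × List String) :=
  let tokens := PySem.Str.split₀ normalized_text
  -- [(nxt, tok) for tok, nxt in zip(tokens, tokens[1:]) if tok.isdigit() and nxt in UNITS]
  let hits := ((tokens.zip (PySem.List.slice tokens (some 1) none)).filter
      (fun p => PySem.Str.strIsdigit p.1 && pvIsUnit p.2)).map (fun p => (p.2, p.1))
  -- for u, _ in hits: if u not in units: units.append(u)
  let units := hits.foldl (fun acc p => if acc.contains p.1 then acc else acc ++ [p.1]) []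
  -- {u: {q for v, q in hits if v == u} for u in units}
  let measures := units.foldl (fun d u =>
      d.insert u (PySem.Set.ofList ((hits.filter (fun p => p.1 == u)).map (fun p => p.2))))
      PySem.Dict.empty
  -- [m for m in ("HALF", "FULL", "KIT") if m in tokens]
  let specials := ["HALF", "FULL", "KIT"].filter (fun m => tokens.contains m)
  let measures := if specials ≠ [] then
      measures.insert "SPECIAL" (PySem.Set.ofList specials) else measures
  measures.items

-- ===== PRECONDITION & SPEC =====
def Spec_extract_measures (normalized_text : String) (out : List (String × List String)) : Prop := out = extract_measures_alt normalized_text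
instance (normalized_text : String) (out : List (String × List String)) : Decidable (Spec_extract_measures normalized_text out) := by unfold Spec_extract_measures; infer_instance

-- ===== CLAIM (what is proved, stated in full; the proofs are below) =====
def Claim_equal_extract_measures : Prop := ∀ (normalized_text : String), Dom_extract_measures normalized_text → Spec_extract_measures normalized_text (extract_measures normalized_text)

-- ===== LEMMAS AND PROOFS =====

-- proof-only abbreviations
def pvIns (d : PySem.Dict String (PySem.Set String)) (p : String × String) :
    PySem.Dict String (PySem.Set String) :=
  d.insert p.1 (PySem.Set.add (d.getD p.1 PySem.Set.empty) p.2)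

def pvFA (ts : List String) (it : Int × String) : Option (String × String) :=
  let nxt := PySem.List.pyGetD ts (it.1 + 1) ""
  if PySem.Str.strIsdigit it.2 && pvIsUnit nxt then some (nxt, it.2) else none

def pvHits (ts : List String) : List (String × String) :=
  ((ts.zip ts.tail).filter (fun p => PySem.Str.strIsdigit p.1 && pvIsUnit p.2)).map
    (fun p => (p.2, p.1))

-- one conditional 'add marker to measures["SPECIAL"]' step of A
def pvAddSpec (b : Bool) (w : String) (m : PySem.Dict String (PySem.Set String)) :
    PySem.Dict String (PySem.Set String) :=
  if b then m.insert "SPECIAL" (PySem.Set.add (m.getD "SPECIAL" PySem.Set.empty) w) else m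

-- B's hit list as written in the port (slice form)
def pvBHits (ts : List String) : List (String × String) :=
  ((ts.zip (PySem.List.slice ts (some 1) none)).filter
    (fun p => PySem.Str.strIsdigit p.1 && pvIsUnit p.2)).map (fun p => (p.2, p.1))

-- A's pair loop is a fold of pvIns over the pairs its condition selects
theorem pv_fold_conv (ts : List String) (l : List (Int × String)) :
    ∀ d, l.foldl (pvStepA ts) d = (l.filterMap (pvFA ts)).foldl pvIns d := by
  induction l with
  | nil => intro d; rfl
  | cons x xs ih =>
      intro d
      rw [List.foldl_cons, List.filterMap_cons]
      have hx : pvStepA ts d x = (pvFA ts x).elim d (pvIns d) := by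
        simp only [pvStepA, pvFA, pvIsUnit]
        split <;> rfl
      cases h : pvFA ts x with
      | none =>
          rw [hx, h]
          try exact ih d
      | some p =>
          rw [hx, h, List.foldl_cons]
          try exact ih _

-- the enumerated (token, next) pairs of tokens[:-1] are zip(tokens, tokens[1:])
theorem pv_pairs_eq (ts : List String) :
    (PySem.List.enumerate ts.dropLast 0).map
        (fun it => (it.2, PySem.List.pyGetD ts (it.1 + 1) "")) = ts.zip ts.tail := by
  apply List.ext_getElem
  · simp only [List.length_map, PySem.List.length_enumerate, List.length_dropLast,
      List.length_zip, List.length_tail]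
    omega
  · intro k h1 h2
    have hk : k < ts.length - 1 := by
      simpa [PySem.List.length_enumerate] using h1
    have hget : PySem.List.pyGetD ts ((0 : Int) + k + 1) "" = ts[k + 1]'(by omega) := by
      rw [show (0 : Int) + k + 1 = ((k + 1 : Nat) : Int) by push_cast; ring]
      rw [PySem.List.pyGetD_natCast]
      simp [List.getD_eq_getElem?_getD, List.getElem?_eq_getElem (by omega : k + 1 < ts.length)]
    simp only [List.getElem_map, PySem.List.getElem_enumerate, List.getElem_zip,
      List.getElem_tail, List.getElem_dropLast, hget]

-- filterMap of an if-some-else-none is filter-then-map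
theorem pv_filterMap_if {α β : Type} (c : α → Bool) (f : α → β) (l : List α) :
    l.filterMap (fun x => if c x then some (f x) else none) = (l.filter c).map f := by
  induction l with
  | nil => rfl
  | cons x xs ih =>
      by_cases h : c x <;> simp [h, ih]

-- A's selected pairs are exactly B's hits
theorem pv_hits_eq (ts : List String) :
    (PySem.List.enumerate ts.dropLast 0).filterMap (pvFA ts) = pvHits ts := by
  have hcomp : pvFA ts = (fun p : String × String =>
      if PySem.Str.strIsdigit p.1 && pvIsUnit p.2 then some (p.2, p.1) else none) ∘
      (fun it : Int × String => (it.2, PySem.List.pyGetD ts (it.1 + 1) "")) := by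
    funext it; rfl
  rw [hcomp, ← List.filterMap_map, pv_pairs_eq, pvHits,
    pv_filterMap_if (fun p : String × String => PySem.Str.strIsdigit p.1 && pvIsUnit p.2)
      (fun p : String × String => (p.2, p.1))]

-- the value stored at key c by the pvIns fold
theorem pv_getD_fold (l : List (String × String)) :
    ∀ d c, (l.foldl pvIns d).getD c PySem.Set.empty =
      ((l.filter (fun p => p.1 == c)).map (fun p => p.2)).foldl PySem.Set.add
        (d.getD c PySem.Set.empty) := by
  induction l with
  | nil => intro d c; rfl
  | cons x xs ih =>
      intro d c
      rw [List.foldl_cons, ih, List.filter_cons]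
      by_cases h : x.1 = c
      · simp only [h, beq_self_eq_true, if_pos, List.map_cons, List.foldl_cons, pvIns,
          PySem.Dict.getD_insert_self]
      · have hb : (x.1 == c) = false := beq_eq_false_iff_ne.mpr h
        simp only [hb, Bool.false_eq_true, if_false, pvIns,
          PySem.Dict.getD_insert_of_ne _ _ _ (Ne.symm h)]

-- keys of the pvIns fold from empty: distinct first components in order
theorem pv_keys_fold (l : List (String × String)) :
    (l.foldl pvIns PySem.Dict.empty).keys = PySem.Set.ofList (l.map (fun p => p.1)) := by
  have h := PySem.Dict.keys_foldl_insert_key l (fun p => p.1)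
    (fun d p => PySem.Set.add (d.getD p.1 PySem.Set.empty) p.2) PySem.Dict.empty
  simpa [pvIns, PySem.Dict.keys_empty, PySem.Set.ofList_eq_foldl, PySem.Set.update] using h

-- keys of the pvIns fold from empty are unique
theorem pv_nodup_keys (l : List (String × String)) :
    (l.foldl pvIns PySem.Dict.empty).keys.Nodup := by
  have h := PySem.Dict.nodup_keys_foldl_insert_key l (fun p => p.1)
    (fun d p => PySem.Set.add (d.getD p.1 PySem.Set.empty) p.2) PySem.Dict.empty
    PySem.Dict.nodup_keys_empty
  simpa [pvIns] using h

-- the pair dict never carries the key "SPECIAL"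
theorem pv_no_special (ts : List String) :
    "SPECIAL" ∉ ((pvHits ts).foldl pvIns PySem.Dict.empty).keys := by
  rw [pv_keys_fold, PySem.Set.mem_ofList]
  intro h
  obtain ⟨p, hp, hfst⟩ := List.mem_map.mp h
  obtain ⟨q, hq, rfl⟩ := List.mem_map.mp hp
  have hc := List.of_mem_filter hq
  simp only at hfst
  rw [hfst] at hc
  exact absurd (Bool.and_elim_right hc) (by decide)

-- B's distinct-units loop is ordered dedup of the hit units
theorem pv_units_eq (hits : List (String × String)) :
    hits.foldl (fun acc p => if acc.contains p.1 then acc else acc ++ [p.1]) [] =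
      PySem.Set.ofList (hits.map (fun p => p.1)) := by
  rw [PySem.Set.ofList_eq_foldl, List.foldl_map]
  rfl

-- lookup in a dict built by inserting a value function over a key list
theorem pv_getD_build (V : String → PySem.Set String) (units : List String) :
    ∀ (d : PySem.Dict String (PySem.Set String)) (c : String),
      (units.foldl (fun d u => d.insert u (V u)) d).getD c PySem.Set.empty =
        if c ∈ units then V c else d.getD c PySem.Set.empty := by
  induction units with
  | nil => intro d c; simp
  | cons u us ih =>
      intro d c
      rw [List.foldl_cons, ih, PySem.Dict.getD_insert]
      by_cases hc : c ∈ us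
      · simp [hc]
      · by_cases he : c = u <;> simp [hc, he]

-- B's grouping comprehension rebuilds exactly the pvIns fold
theorem pv_dicts_eq (hits : List (String × String)) :
    (PySem.Set.ofList (hits.map (fun p => p.1))).foldl (fun d u =>
        d.insert u (PySem.Set.ofList ((hits.filter (fun p => p.1 == u)).map (fun p => p.2))))
        PySem.Dict.empty =
      hits.foldl pvIns PySem.Dict.empty := by
  apply PySem.Dict.ext
  have hnd : (PySem.Set.ofList (hits.map (fun p => p.1))).Nodup := PySem.Set.nodup_ofList _
  have hkeys := PySem.Dict.keys_foldl_insert (ν := PySem.Set String)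
      (PySem.Set.ofList (hits.map (fun p => p.1)))
      (fun _ u => PySem.Set.ofList ((hits.filter (fun p => p.1 == u)).map (fun p => p.2)))
      PySem.Dict.empty
  have hupd : PySem.Set.update (PySem.Dict.empty : PySem.Dict String (PySem.Set String)).keys
      (PySem.Set.ofList (hits.map (fun p => p.1)))
      = PySem.Set.ofList (hits.map (fun p => p.1)) := by
    rw [PySem.Dict.keys_empty]
    exact (PySem.Set.ofList_eq_foldl _).symm.trans (PySem.Set.ofList_eq_self_of_nodup _ hnd)
  rw [PySem.Dict.items_eq_map_keys _ (by rw [hkeys, hupd]; exact hnd) PySem.Set.empty,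
      PySem.Dict.items_eq_map_keys _ (pv_nodup_keys hits) PySem.Set.empty,
      hkeys, hupd, pv_keys_fold]
  apply List.map_congr_left
  intro u hu
  rw [pv_getD_build, pv_getD_fold, PySem.Dict.getD_empty, if_pos hu,
    PySem.Set.ofList_eq_foldl]
  rfl

-- A's three conditional SPECIAL additions equal B's single conditional insert
theorem pv_chain (ts : List String) (m : PySem.Dict String (PySem.Set String))
    (hs : "SPECIAL" ∉ m.keys) :
    pvAddSpec (ts.contains "KIT") "KIT" (pvAddSpec (ts.contains "FULL") "FULL"
        (pvAddSpec (ts.contains "HALF") "HALF" m)) =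
      (if (["HALF", "FULL", "KIT"].filter (fun x => ts.contains x)) ≠ [] then
        m.insert "SPECIAL"
          (PySem.Set.ofList (["HALF", "FULL", "KIT"].filter (fun x => ts.contains x)))
      else m) := by
  have hc : m.contains "SPECIAL" = false := by
    rw [← Bool.not_eq_true, PySem.Dict.contains_iff_mem_keys]; exact hs
  have hget : m.getD "SPECIAL" ([] : PySem.Set String) = [] :=
    PySem.Dict.getD_of_not_contains m _ hc
  by_cases hH : "HALF" ∈ ts <;> by_cases hF : "FULL" ∈ ts <;> by_cases hK : "KIT" ∈ ts <;>
    simp [pvAddSpec, List.filter, hH, hF, hK, hget, PySem.Dict.getD_insert_self,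
      PySem.Dict.insert_insert_self, PySem.Set.add, PySem.Set.ofList, PySem.Set.contains,
      PySem.Set.empty, List.foldl_cons, List.foldl_nil]

-- the two port bodies agree for every token list
theorem pv_bodies (ts : List String) :
    (pvAddSpec (ts.contains "KIT") "KIT" (pvAddSpec (ts.contains "FULL") "FULL"
      (pvAddSpec (ts.contains "HALF") "HALF"
        ((PySem.List.enumerate (PySem.List.slice ts none (some (-1))) 0).foldl
          (pvStepA ts) PySem.Dict.empty)))).items =
    (if (["HALF", "FULL", "KIT"].filter (fun x => ts.contains x)) ≠ [] then
        (((pvBHits ts).foldl (fun acc p => if acc.contains p.1 then acc else acc ++ [p.1])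
            []).foldl (fun d u => d.insert u
              (PySem.Set.ofList (((pvBHits ts).filter (fun p => p.1 == u)).map (fun p => p.2))))
            PySem.Dict.empty).insert "SPECIAL"
          (PySem.Set.ofList (["HALF", "FULL", "KIT"].filter (fun x => ts.contains x)))
      else ((pvBHits ts).foldl (fun acc p => if acc.contains p.1 then acc else acc ++ [p.1])
            []).foldl (fun d u => d.insert u
              (PySem.Set.ofList (((pvBHits ts).filter (fun p => p.1 == u)).map (fun p => p.2))))
            PySem.Dict.empty).items := by
  have hbh : pvBHits ts = pvHits ts := by
    unfold pvBHits pvHits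
    rw [PySem.List.slice_from_one]
  have hA : (PySem.List.enumerate (PySem.List.slice ts none (some (-1))) 0).foldl
      (pvStepA ts) PySem.Dict.empty = (pvHits ts).foldl pvIns PySem.Dict.empty := by
    rw [PySem.List.slice_to_neg_one, pv_fold_conv, pv_hits_eq]
  rw [hbh, hA, pv_units_eq, pv_dicts_eq]
  exact congrArg PySem.Dict.items (pv_chain ts _ (pv_no_special ts))

-- ===== VERDICT (by name: the statement is the Claim_ definition above) =====
theorem extract_measures_spec : Claim_equal_extract_measures := by
  intro s _
  unfold Spec_extract_measures extract_measures extract_measures_alt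
  exact pv_bodies (PySem.Str.split₀ s)
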